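-- pv_equiv track=rewrite | github.com/ActRiX27/logs | detect_from_tree.py | detect_dataset_types
-- ===== SOURCE A (Python) =====
-- from typing import Dict, Iterable, List, Optional, Sequence
--
-- def detect_dataset_types(paths: List[str]) -> Dict[str, bool]:
--     """识别备份、sysdiagnose 与日志特征，补充边界信号。"""
--
--     lowered_paths = [p.lower() for p in paths]
--     is_backup = any(
--         "manifest.db" in p
--         or "manifest.mbdb" in p
--         or "status.plist" in p
--         or p.endswith("/info.plist")
--         for p in lowered_paths
--     )
--     is_sysdiag = any(
--         "sysdiagnose" in p
--         or "system_logs" in p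
--         or ".tracev3" in p
--         or "/oslog" in p
--         or p.endswith(".tar")
--         or "filesystem" in p
--         for p in lowered_paths
--     )
--     has_profiles = any(
--         "configurationprofiles" in p or "provisioningprofiles" in p or "userconfigurationprofiles" in p
--         for p in lowered_paths
--     )
--     has_oslog = any("oslog" in p or "logarchive" in p or ".tracev3" in p for p in lowered_paths)
--     return {
--         "is_backup": is_backup,
--         "is_sysdiag": is_sysdiag,
--         "has_profiles": has_profiles,
--         "has_oslog": has_oslog,
--     }
-- ===== SOURCE B (Python) =====
-- def detect_dataset_types(paths):
--     """Single pass: lowercase each path once and OR into four flags, breaking early when all are set."""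
--     is_backup = is_sysdiag = has_profiles = has_oslog = False
--     for p in paths:
--         q = p.lower()
--         if not is_backup:
--             is_backup = ("manifest.db" in q or "manifest.mbdb" in q
--                          or "status.plist" in q or q.endswith("/info.plist"))
--         if not is_sysdiag:
--             is_sysdiag = ("sysdiagnose" in q or "system_logs" in q or ".tracev3" in q
--                           or "/oslog" in q or q.endswith(".tar") or "filesystem" in q)
--         if not has_profiles:
--             has_profiles = ("configurationprofiles" in q or "provisioningprofiles" in q
--                             or "userconfigurationprofiles" in q)
--         if not has_oslog:
--             has_oslog = ("oslog" in q or "logarchive" in q or ".tracev3" in q)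
--         if is_backup and is_sysdiag and has_profiles and has_oslog:
--             break
--     return {
--         "is_backup": is_backup,
--         "is_sysdiag": is_sysdiag,
--         "has_profiles": has_profiles,
--         "has_oslog": has_oslog,
--     }
-- ===== Notes on version B (the rewrite author's own statement) =====
-- stated objective: alternative
-- what changed: Replaced the intermediate lowered list plus four separate any() scans with one loop over paths that lowercases each path once and accumulates the four boolean flags, breaking early once all four are set.
import Mathlib
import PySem

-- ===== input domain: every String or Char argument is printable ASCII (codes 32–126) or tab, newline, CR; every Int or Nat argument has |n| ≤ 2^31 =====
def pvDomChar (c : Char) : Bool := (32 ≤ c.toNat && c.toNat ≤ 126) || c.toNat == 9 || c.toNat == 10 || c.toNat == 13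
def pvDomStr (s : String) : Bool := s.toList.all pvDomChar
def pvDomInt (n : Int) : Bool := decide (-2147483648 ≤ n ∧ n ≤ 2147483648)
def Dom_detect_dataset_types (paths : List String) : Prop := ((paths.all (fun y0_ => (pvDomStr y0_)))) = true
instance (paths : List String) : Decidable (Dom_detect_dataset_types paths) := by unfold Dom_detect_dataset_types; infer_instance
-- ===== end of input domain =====

-- B replaces the lowered-list build plus four separate any() scans by one single-pass loop
-- accumulating four flags with an early break; same results, different decomposition.

-- ===== PORT A =====
def detect_dataset_types (paths : List String) : List (String × Bool) :=
  let lowered_paths := paths.map PySem.Str.lower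
  let is_backup := lowered_paths.any (fun p =>
    PySem.Str.isIn "manifest.db" p || PySem.Str.isIn "manifest.mbdb" p
      || PySem.Str.isIn "status.plist" p || PySem.Str.endswith p "/info.plist")
  let is_sysdiag := lowered_paths.any (fun p =>
    PySem.Str.isIn "sysdiagnose" p || PySem.Str.isIn "system_logs" p
      || PySem.Str.isIn ".tracev3" p || PySem.Str.isIn "/oslog" p
      || PySem.Str.endswith p ".tar" || PySem.Str.isIn "filesystem" p)
  let has_profiles := lowered_paths.any (fun p =>
    PySem.Str.isIn "configurationprofiles" p || PySem.Str.isIn "provisioningprofiles" p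
      || PySem.Str.isIn "userconfigurationprofiles" p)
  let has_oslog := lowered_paths.any (fun p =>
    PySem.Str.isIn "oslog" p || PySem.Str.isIn "logarchive" p || PySem.Str.isIn ".tracev3" p)
  [("is_backup", is_backup), ("is_sysdiag", is_sysdiag),
   ("has_profiles", has_profiles), ("has_oslog", has_oslog)]

-- ===== PORT B =====
-- the loop of Source B: four flag accumulators, lowercase once per path, early break when all set
def pvDetectLoop : List String → Bool → Bool → Bool → Bool → Bool × Bool × Bool × Bool
  | [], b, s, pr, o => (b, s, pr, o)
  | p :: rest, b, s, pr, o =>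
    let q := PySem.Str.lower p
    let b' := if b then b else
      (PySem.Str.isIn "manifest.db" q || PySem.Str.isIn "manifest.mbdb" q
        || PySem.Str.isIn "status.plist" q || PySem.Str.endswith q "/info.plist")
    let s' := if s then s else
      (PySem.Str.isIn "sysdiagnose" q || PySem.Str.isIn "system_logs" q
        || PySem.Str.isIn ".tracev3" q || PySem.Str.isIn "/oslog" q
        || PySem.Str.endswith q ".tar" || PySem.Str.isIn "filesystem" q)
    let pr' := if pr then pr else
      (PySem.Str.isIn "configurationprofiles" q || PySem.Str.isIn "provisioningprofiles" q
        || PySem.Str.isIn "userconfigurationprofiles" q)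
    let o' := if o then o else
      (PySem.Str.isIn "oslog" q || PySem.Str.isIn "logarchive" q || PySem.Str.isIn ".tracev3" q)
    if b' && s' && pr' && o' then (b', s', pr', o')
    else pvDetectLoop rest b' s' pr' o'

def detect_dataset_types_alt (paths : List String) : List (String × Bool) :=
  let r := pvDetectLoop paths false false false false
  [("is_backup", r.1), ("is_sysdiag", r.2.1),
   ("has_profiles", r.2.2.1), ("has_oslog", r.2.2.2)]

-- ===== PRECONDITION & SPEC =====
def Spec_detect_dataset_types (paths : List String) (out : List (String × Bool)) : Prop := out = detect_dataset_types_alt paths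
instance (paths : List String) (out : List (String × Bool)) : Decidable (Spec_detect_dataset_types paths out) := by unfold Spec_detect_dataset_types; infer_instance

-- ===== CLAIM (what is proved, stated in full; the proofs are below) =====
def Claim_equal_detect_dataset_types : Prop := ∀ (paths : List String), Dom_detect_dataset_types paths → Spec_detect_dataset_types paths (detect_dataset_types paths)

-- ===== LEMMAS AND PROOFS =====

def pvTestB (q : String) : Bool :=
  PySem.Str.isIn "manifest.db" q || PySem.Str.isIn "manifest.mbdb" q
    || PySem.Str.isIn "status.plist" q || PySem.Str.endswith q "/info.plist"
def pvTestS (q : String) : Bool :=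
  PySem.Str.isIn "sysdiagnose" q || PySem.Str.isIn "system_logs" q
    || PySem.Str.isIn ".tracev3" q || PySem.Str.isIn "/oslog" q
    || PySem.Str.endswith q ".tar" || PySem.Str.isIn "filesystem" q
def pvTestP (q : String) : Bool :=
  PySem.Str.isIn "configurationprofiles" q || PySem.Str.isIn "provisioningprofiles" q
    || PySem.Str.isIn "userconfigurationprofiles" q
def pvTestO (q : String) : Bool :=
  PySem.Str.isIn "oslog" q || PySem.Str.isIn "logarchive" q || PySem.Str.isIn ".tracev3" q

theorem pvDetectLoop_eq (l : List String) (b s pr o : Bool) :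
    pvDetectLoop l b s pr o =
      (b || l.any (fun p => pvTestB (PySem.Str.lower p)),
       s || l.any (fun p => pvTestS (PySem.Str.lower p)),
       pr || l.any (fun p => pvTestP (PySem.Str.lower p)),
       o || l.any (fun p => pvTestO (PySem.Str.lower p))) := by
  induction l generalizing b s pr o with
  | nil => simp [pvDetectLoop]
  | cons p rest ih =>
    show (if _ then _ else pvDetectLoop rest _ _ _ _) = _
    rw [show (if b = true then b else
          (PySem.Str.isIn "manifest.db" (PySem.Str.lower p) || PySem.Str.isIn "manifest.mbdb" (PySem.Str.lower p)
            || PySem.Str.isIn "status.plist" (PySem.Str.lower p) || PySem.Str.endswith (PySem.Str.lower p) "/info.plist"))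
        = (b || pvTestB (PySem.Str.lower p)) from by cases b <;> simp [pvTestB],
      show (if s = true then s else
          (PySem.Str.isIn "sysdiagnose" (PySem.Str.lower p) || PySem.Str.isIn "system_logs" (PySem.Str.lower p)
            || PySem.Str.isIn ".tracev3" (PySem.Str.lower p) || PySem.Str.isIn "/oslog" (PySem.Str.lower p)
            || PySem.Str.endswith (PySem.Str.lower p) ".tar" || PySem.Str.isIn "filesystem" (PySem.Str.lower p)))
        = (s || pvTestS (PySem.Str.lower p)) from by cases s <;> simp [pvTestS],
      show (if pr = true then pr else
          (PySem.Str.isIn "configurationprofiles" (PySem.Str.lower p) || PySem.Str.isIn "provisioningprofiles" (PySem.Str.lower p)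
            || PySem.Str.isIn "userconfigurationprofiles" (PySem.Str.lower p)))
        = (pr || pvTestP (PySem.Str.lower p)) from by cases pr <;> simp [pvTestP],
      show (if o = true then o else
          (PySem.Str.isIn "oslog" (PySem.Str.lower p) || PySem.Str.isIn "logarchive" (PySem.Str.lower p)
            || PySem.Str.isIn ".tracev3" (PySem.Str.lower p)))
        = (o || pvTestO (PySem.Str.lower p)) from by cases o <;> simp [pvTestO]]
    split
    · rename_i h
      simp only [Bool.and_eq_true] at h
      obtain ⟨⟨⟨h1, h2⟩, h3⟩, h4⟩ := h
      simp only [List.any_cons, ← Bool.or_assoc, h1, h2, h3, h4, Bool.true_or]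
    · rw [ih]
      simp [List.any_cons, Bool.or_assoc]

-- ===== VERDICT (by name: the statement is the Claim_ definition above) =====
theorem detect_dataset_types_spec : Claim_equal_detect_dataset_types := by
  intro paths _
  show detect_dataset_types paths = detect_dataset_types_alt paths
  simp only [detect_dataset_types, detect_dataset_types_alt, pvDetectLoop_eq,
    List.any_map, Function.comp_def, pvTestB, pvTestS, pvTestP, pvTestO, Bool.false_or]
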